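-- pv_equiv track=rewrite | github.com/ishajoshi251/Leetcode-Practice | Array Operations - GFG/array-operations.py | arrayOperations
-- ===== SOURCE A (Python) =====
-- from typing import List
--
-- def arrayOperations(n : int, arr : List[int]) -> int:
--     # code here
--     ans = 0
--     count = 0
--     flag = False
--     for i in range(n):
--         if arr[i] == 0:
--             flag = True
--             if count > 0:
--                 ans += 1
--                 count = 0
--         else:
--             count += 1
--     if count>0:
--         ans += 1
--     if not flag:
--         return -1
--     return ans
-- ===== SOURCE B (Python) =====
-- from typing import List
--
-- def arrayOperations(n : int, arr : List[int]) -> int: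
--     prefix = [arr[i] for i in range(n)]
--     zeros = [i for i, x in enumerate(prefix) if x == 0]
--     if not zeros:
--         return -1
--     bounds = [-1] + zeros + [len(prefix)]
--     return sum(1 for a, b in zip(bounds, bounds[1:]) if b - a > 1)
-- ===== Notes on version B (the rewrite author's own statement) =====
-- stated objective: alternative
-- what changed: Instead of A's per-element ans/count/flag state machine, B extracts the list of zero positions in the first-n prefix, returns -1 if it is empty, and counts segments as the gaps wider than 1 between consecutive boundaries [-1] + zeros + [n].
import Mathlib
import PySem

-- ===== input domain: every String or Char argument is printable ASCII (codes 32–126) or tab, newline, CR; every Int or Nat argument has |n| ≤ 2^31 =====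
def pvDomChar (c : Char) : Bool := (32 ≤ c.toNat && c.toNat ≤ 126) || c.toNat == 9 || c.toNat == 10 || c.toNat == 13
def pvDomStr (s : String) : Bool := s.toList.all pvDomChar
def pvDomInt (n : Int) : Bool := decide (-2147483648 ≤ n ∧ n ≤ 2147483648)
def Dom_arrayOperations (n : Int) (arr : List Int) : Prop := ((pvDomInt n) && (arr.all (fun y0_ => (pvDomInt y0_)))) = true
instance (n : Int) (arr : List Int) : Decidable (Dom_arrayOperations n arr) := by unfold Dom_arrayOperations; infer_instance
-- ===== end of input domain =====

-- B replaces A's per-element ans/count/flag state machine by a boundary method: it collects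
-- the zero positions of the first-n prefix (-1 if none) and counts the gaps wider than 1
-- between consecutive boundaries [-1] + zeros + [n] (objective: alternative algorithm).
-- ===== PORT A =====
def arrayOperations (n : Int) (arr : List Int) : Int :=
  let s := (PySem.List.pyRange 0 n 1).foldl (fun (st : Int × Int × Bool) i =>
    let x := (PySem.List.pyGet? arr i).getD 0
    if x = 0 then
      if st.2.1 > 0 then (st.1 + 1, 0, true) else (st.1, st.2.1, true)
    else (st.1, st.2.1 + 1, st.2.2)) (0, 0, false)
  let ans := if s.2.1 > 0 then s.1 + 1 else s.1
  if !s.2.2 then -1 else ans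

-- ===== PORT B =====
def arrayOperations_alt (n : Int) (arr : List Int) : Int :=
  let prefixL := (PySem.List.pyRange 0 n 1).map (fun i => (PySem.List.pyGet? arr i).getD 0)
  let zeros := ((PySem.List.enumerate prefixL).filter (fun p => p.2 == 0)).map (fun p => p.1)
  if zeros = [] then -1
  else
    let bounds := -1 :: (zeros ++ [(prefixL.length : Int)])
    ((bounds.zip bounds.tail).foldl (fun s p => if p.2 - p.1 > 1 then s + 1 else s) 0)

-- ===== PRECONDITION & SPEC =====
-- Pre_ excludes exactly the inputs where A raises IndexError: n > len(arr).
def Pre_arrayOperations (n : Int) (arr : List Int) : Prop := n ≤ arr.length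
instance (n : Int) (arr : List Int) : Decidable (Pre_arrayOperations n arr) := by unfold Pre_arrayOperations; infer_instance
def pvWitness_arrayOperations : Int × List Int := (4, [1, 0, 2, 3])
def Spec_arrayOperations (n : Int) (arr : List Int) (out : Int) : Prop := out = arrayOperations_alt n arr
instance (n : Int) (arr : List Int) (out : Int) : Decidable (Spec_arrayOperations n arr out) := by unfold Spec_arrayOperations; infer_instance

-- ===== CLAIM (what is proved, stated in full; the proofs are below) =====
def Claim_equal_arrayOperations : Prop := ∀ (n : Int) (arr : List Int), Dom_arrayOperations n arr → Pre_arrayOperations n arr → Spec_arrayOperations n arr (arrayOperations n arr)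

-- ===== LEMMAS AND PROOFS =====

-- number of maximal nonzero runs of L, counted when a run CLOSES; p = "a run is open"
def cntEnd (p : Bool) : List Int → Int
  | [] => if p then 1 else 0
  | x :: xs => if x = 0 then (if p then 1 else 0) + cntEnd false xs else cntEnd true xs

def stepA (st : Int × Int × Bool) (x : Int) : Int × Int × Bool :=
  if x = 0 then
    if st.2.1 > 0 then (st.1 + 1, 0, true) else (st.1, st.2.1, true)
  else (st.1, st.2.1 + 1, st.2.2)

-- indices (starting at k) of the zeros of L
def zerosIdx (k : Int) : List Int → List Int
  | [] => []
  | x :: xs => if x = 0 then k :: zerosIdx (k + 1) xs else zerosIdx (k + 1) xs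

-- gap count over boundaries a :: zs ++ [m]
def countGaps (a : Int) (zs : List Int) (m : Int) : Int :=
  match zs with
  | [] => if m - a > 1 then 1 else 0
  | z :: zs' => (if z - a > 1 then 1 else 0) + countGaps z zs' m

theorem stepA_zero_pos (a c : Int) (f : Bool) (h : c > 0) :
    stepA (a, c, f) 0 = (a + 1, 0, true) := by simp [stepA, h]

theorem stepA_zero_neg (a c : Int) (f : Bool) (h : ¬ c > 0) :
    stepA (a, c, f) 0 = (a, c, true) := by simp [stepA, h]

theorem stepA_nonzero (a c : Int) (f : Bool) (x : Int) (h : ¬ x = 0) :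
    stepA (a, c, f) x = (a, c + 1, f) := by simp [stepA, h]

theorem cntEnd_cons_zero (p : Bool) (xs : List Int) :
    cntEnd p (0 :: xs) = (if p then 1 else 0) + cntEnd false xs := by simp [cntEnd]

theorem cntEnd_cons_nonzero (p : Bool) (x : Int) (xs : List Int) (h : ¬ x = 0) :
    cntEnd p (x :: xs) = cntEnd true xs := by simp [cntEnd, h]

theorem zerosIdx_cons_zero (k : Int) (xs : List Int) :
    zerosIdx k (0 :: xs) = k :: zerosIdx (k + 1) xs := by simp [zerosIdx]

theorem zerosIdx_cons_nonzero (k : Int) (x : Int) (xs : List Int) (h : ¬ x = 0) :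
    zerosIdx k (x :: xs) = zerosIdx (k + 1) xs := by simp [zerosIdx, h]

theorem foldA_flag (L : List Int) (a c : Int) (f : Bool) :
    (L.foldl stepA (a, c, f)).2.2 = (f || L.contains 0) := by
  induction L generalizing a c f with
  | nil => simp
  | cons x xs ih =>
    rw [List.foldl_cons]
    by_cases hx : x = 0
    · subst hx
      by_cases hc : c > 0
      · rw [stepA_zero_pos _ _ _ hc, ih]; simp
      · rw [stepA_zero_neg _ _ _ hc, ih]; simp
    · have h0 : ¬ (0 : Int) = x := fun h => hx h.symm
      rw [stepA_nonzero _ _ _ _ hx, ih]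
      simp [h0]

theorem foldA_ans (L : List Int) (a c : Int) (f : Bool) (hc : 0 ≤ c) :
    (if (L.foldl stepA (a, c, f)).2.1 > 0 then (L.foldl stepA (a, c, f)).1 + 1
     else (L.foldl stepA (a, c, f)).1)
      = a + cntEnd (decide (c > 0)) L := by
  induction L generalizing a c f with
  | nil =>
    simp only [List.foldl_nil, cntEnd]
    split <;> simp_all
  | cons x xs ih =>
    rw [List.foldl_cons]
    by_cases hx : x = 0
    · subst hx
      rw [cntEnd_cons_zero]
      by_cases h : c > 0
      · rw [stepA_zero_pos _ _ _ h, ih _ _ _ (le_refl 0)]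
        simp only [decide_eq_true h, if_true,
          decide_eq_false (lt_irrefl (0 : Int))]
        ring
      · rw [stepA_zero_neg _ _ _ h, ih _ _ _ hc]
        simp only [decide_eq_false h, Bool.false_eq_true, if_false]
        ring
    · have h1 : c + 1 > 0 := by omega
      rw [stepA_nonzero _ _ _ _ hx, ih _ _ _ (by omega : (0:Int) ≤ c + 1),
        cntEnd_cons_nonzero _ _ _ hx, decide_eq_true h1]

theorem zerosIdx_nil_iff (L : List Int) (k : Int) :
    zerosIdx k L = [] ↔ ¬ L.contains 0 := by
  induction L generalizing k with
  | nil => simp [zerosIdx]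
  | cons x xs ih =>
    by_cases hx : x = 0
    · subst hx; rw [zerosIdx_cons_zero]; simp
    · have h0 : ¬ (0 : Int) = x := fun h => hx h.symm
      rw [zerosIdx_cons_nonzero _ _ _ hx]
      simp [ih (k + 1), h0]

theorem countGaps_eq_cntEnd (L : List Int) (a k : Int) (hak : a < k) :
    countGaps a (zerosIdx k L) (k + L.length) = cntEnd (decide (k - a > 1)) L := by
  induction L generalizing a k with
  | nil => simp [zerosIdx, countGaps, cntEnd]
  | cons x xs ih =>
    have hlen : k + ((x :: xs).length : Int) = (k + 1) + (xs.length : Int) := by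
      simp [List.length_cons]; ring
    by_cases hx : x = 0
    · subst hx
      rw [zerosIdx_cons_zero, cntEnd_cons_zero, hlen]
      simp only [countGaps]
      rw [ih k (k + 1) (by omega), decide_eq_false (by omega : ¬ (k + 1 - k > 1))]
      simp
    · rw [zerosIdx_cons_nonzero _ _ _ hx, cntEnd_cons_nonzero _ _ _ hx, hlen,
        ih a (k + 1) (by omega), decide_eq_true (by omega : k + 1 - a > 1)]

theorem enum_filter_eq_zerosIdx (L : List Int) (s : Int) :
    ((PySem.List.enumerate L s).filter (fun p => p.2 == 0)).map (fun p => p.1)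
      = zerosIdx s L := by
  induction L generalizing s with
  | nil => simp [PySem.List.enumerate_nil, zerosIdx]
  | cons x xs ih =>
    rw [PySem.List.enumerate_cons]
    by_cases hx : x = 0
    · subst hx
      rw [zerosIdx_cons_zero]
      simp [ih]
    · rw [zerosIdx_cons_nonzero _ _ _ hx]
      simp [hx, ih]

theorem zip_tail_countGaps (a : Int) (zs : List Int) (m acc : Int) :
    (((a :: (zs ++ [m])).zip (zs ++ [m])).foldl
        (fun s p => if p.2 - p.1 > 1 then s + 1 else s) acc)
      = acc + countGaps a zs m := by
  induction zs generalizing a acc with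
  | nil =>
    simp only [List.nil_append, List.zip_cons_cons, List.zip_nil_right,
      List.foldl_cons, List.foldl_nil, countGaps]
    split <;> ring
  | cons z zs' ih =>
    simp only [List.cons_append, List.zip_cons_cons, List.foldl_cons, countGaps]
    rw [ih]
    split <;> ring

-- ===== VERDICT (by name: the statement is the Claim_ definition above) =====
theorem arrayOperations_spec : Claim_equal_arrayOperations := by
  intro n arr _ _
  unfold Spec_arrayOperations arrayOperations arrayOperations_alt
  dsimp only
  set L := (PySem.List.pyRange 0 n 1).map (fun i => (PySem.List.pyGet? arr i).getD 0) with hL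
  have hfold : (PySem.List.pyRange 0 n 1).foldl (fun (st : Int × Int × Bool) i =>
        let x := (PySem.List.pyGet? arr i).getD 0
        if x = 0 then
          if st.2.1 > 0 then (st.1 + 1, 0, true) else (st.1, st.2.1, true)
        else (st.1, st.2.1 + 1, st.2.2)) (0, 0, false)
      = L.foldl stepA (0, 0, false) := by
    rw [hL, List.foldl_map]; rfl
  rw [hfold, enum_filter_eq_zerosIdx L 0]
  have hflag := foldA_flag L 0 0 false
  have hans := foldA_ans L 0 0 false (le_refl 0)
  by_cases hz : L.contains 0
  · have hf : (L.foldl stepA (0, 0, false)).2.2 = true := by rw [hflag]; simpa using hz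
    have hne : ¬ zerosIdx 0 L = [] := by rw [zerosIdx_nil_iff]; simpa using hz
    rw [hf, if_neg (by simp : ¬ ((!true) = true)), if_neg hne, hans]
    rw [List.tail_cons, zip_tail_countGaps (-1) (zerosIdx 0 L) (L.length : Int) 0]
    rw [show ((L.length : Int)) = 0 + (L.length : Int) by ring,
      countGaps_eq_cntEnd L (-1) 0 (by omega)]
    norm_num
  · have hf : (L.foldl stepA (0, 0, false)).2.2 = false := by rw [hflag]; simpa using hz
    have he : zerosIdx 0 L = [] := by rw [zerosIdx_nil_iff]; simpa using hz
    rw [hf, if_pos (by simp : (!false) = true), if_pos he]
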